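-- pv_equiv track=rewrite | github.com/smj9504/ai-estimate-pipeline | tests/utils/test_data_loader.py | _extract_additional_notes_from_intake
-- ===== SOURCE A (Python) =====
-- from typing import Dict, List, Any, Optional, Union
--
-- def _extract_additional_notes_from_intake(room_name: str, intake_form: str) -> Dict[str, List[str]]:
--     """Extract additional notes for a specific room from intake form"""
--     # Parse intake form for room-specific notes
--     protection_notes = []
--     detach_reset_notes = []
--
--     # Look for room-specific sections in intake form
--     lines = intake_form.split('\n')
--     in_room_section = False
--     current_room = None
--
--     for line in lines:
--         line = line.strip()
--
--         if line.startswith('Room:'):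
--             current_room = line.replace('Room:', '').strip()
--             in_room_section = (current_room.lower() == room_name.lower())
--         elif line.startswith('Room:') or (line.startswith('[') and line.endswith(']')):
--             in_room_section = False
--         elif in_room_section:
--             if 'Protection:' in line or 'protection' in line.lower():
--                 # Extract protection items
--                 if 'cover' in line.lower() or 'seal' in line.lower() or 'plastic' in line.lower():
--                     protection_notes.append(line.replace('-', '').replace('Protection:', '').strip())
--             elif 'Detach & Reset:' in line or 'detach' in line.lower():
--                 # Extract detach/reset items
--                 if 'detach' in line.lower() or 'reset' in line.lower():
--                     detach_reset_notes.append(line.replace('-', '').replace('Detach & Reset:', '').strip())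
--
--     # Default notes if none found
--     if not protection_notes and not detach_reset_notes:
--         if 'living' in room_name.lower():
--             protection_notes = ["cover furniture", "seal doorways"]
--             detach_reset_notes = ["wall-mounted TV", "artwork"]
--         elif 'kitchen' in room_name.lower():
--             protection_notes = ["plastic wrap appliances"]
--             detach_reset_notes = ["dishwasher", "refrigerator water line"]
--         elif 'bathroom' in room_name.lower():
--             protection_notes = ["cover fixtures"]
--             detach_reset_notes = ["toilet", "vanity"]
--
--     return {
--         "protection": protection_notes,
--         "detach_reset": detach_reset_notes
--     }
-- ===== SOURCE B (Python) =====
-- def _extract_additional_notes_from_intake(room_name: str, intake_form: str):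
--     """Extract additional notes for a specific room from intake form.
--
--     Two-pass decomposition: first group stripped content lines under their
--     'Room:' header (a bracket line closes the current group), then gather the
--     lines of every group whose room matches case-insensitively and classify
--     them into protection / detach-reset notes.
--     """
--     lines = [ln.strip() for ln in intake_form.split('\n')]
--
--     # Pass 1: group content lines under the room header that precedes them.
--     groups = []
--     i, n = 0, len(lines)
--     while i < n:
--         s = lines[i]
--         i += 1
--         if s.startswith('Room:'):
--             room = s.replace('Room:', '').strip()
--             body = []
--             while i < n:
--                 t = lines[i]
--                 if t.startswith('Room:'):
--                     break
--                 i += 1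
--                 if t.startswith('[') and t.endswith(']'):
--                     break
--                 body.append(t)
--             groups.append((room, body))
--
--     # Pass 2: gather, in order, the lines of every matching group.
--     target = room_name.lower()
--     gathered = [ln for room, body in groups if room.lower() == target
--                 for ln in body]
--
--     # Classify the gathered lines.
--     protection_notes = []
--     detach_reset_notes = []
--     for s in gathered:
--         low = s.lower()
--         if 'Protection:' in s or 'protection' in low:
--             if 'cover' in low or 'seal' in low or 'plastic' in low:
--                 protection_notes.append(
--                     s.replace('-', '').replace('Protection:', '').strip())
--         elif 'Detach & Reset:' in s or 'detach' in low:
--             if 'detach' in low or 'reset' in low: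
--                 detach_reset_notes.append(
--                     s.replace('-', '').replace('Detach & Reset:', '').strip())
--
--     # Default notes if none found.
--     if not protection_notes and not detach_reset_notes:
--         if 'living' in target:
--             protection_notes = ["cover furniture", "seal doorways"]
--             detach_reset_notes = ["wall-mounted TV", "artwork"]
--         elif 'kitchen' in target:
--             protection_notes = ["plastic wrap appliances"]
--             detach_reset_notes = ["dishwasher", "refrigerator water line"]
--         elif 'bathroom' in target:
--             protection_notes = ["cover fixtures"]
--             detach_reset_notes = ["toilet", "vanity"]
--
--     return {
--         "protection": protection_notes,
--         "detach_reset": detach_reset_notes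
--     }
-- ===== Notes on version B (the rewrite author's own statement) =====
-- stated objective: alternative
-- what changed: A's single stateful line scan (carrying an in_room_section flag and appending to the note lists as it goes) is replaced by a two-pass decomposition: first group stripped content lines under their 'Room:' header (a bracket line closes the group), then gather the lines of every case-insensitively matching group in order and classify them into protection/detach-reset notes, with the same default fallback.
import Mathlib
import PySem

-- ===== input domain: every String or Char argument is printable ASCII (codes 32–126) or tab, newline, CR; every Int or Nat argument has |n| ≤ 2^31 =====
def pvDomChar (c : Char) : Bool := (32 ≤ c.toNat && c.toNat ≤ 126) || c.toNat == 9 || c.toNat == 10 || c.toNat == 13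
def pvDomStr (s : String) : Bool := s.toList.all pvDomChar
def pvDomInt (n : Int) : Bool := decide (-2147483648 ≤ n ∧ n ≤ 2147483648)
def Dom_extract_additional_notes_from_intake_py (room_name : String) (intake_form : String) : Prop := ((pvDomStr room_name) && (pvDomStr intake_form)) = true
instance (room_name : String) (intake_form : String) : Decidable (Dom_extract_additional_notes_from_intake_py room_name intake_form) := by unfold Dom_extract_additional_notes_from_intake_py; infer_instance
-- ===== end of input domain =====

-- B replaces A's single stateful scan by a two-pass decomposition (group lines under
-- their room header, then gather and classify the matching groups); objective: alternative.

-- ===== PORT A =====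
-- A's loop state: (protection_notes, detach_reset_notes, in_room_section, current_room)
def pvStepA (room_name : String) (st : List String × List String × Bool × Option String)
    (rawLine : String) : List String × List String × Bool × Option String :=
  let (p, d, inSec, cr) := st
  let line := PySem.Str.strip rawLine
  if PySem.Str.startswith line "Room:" then
    let room := PySem.Str.strip (PySem.Str.replace line "Room:" "")
    (p, d, PySem.Str.lower room == PySem.Str.lower room_name, some room)
  else if PySem.Str.startswith line "Room:" ||
      (PySem.Str.startswith line "[" && PySem.Str.endswith line "]") then
    (p, d, false, cr)
  else if inSec then
    if PySem.Str.isIn "Protection:" line || PySem.Str.isIn "protection" (PySem.Str.lower line) then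
      if PySem.Str.isIn "cover" (PySem.Str.lower line) || PySem.Str.isIn "seal" (PySem.Str.lower line) ||
          PySem.Str.isIn "plastic" (PySem.Str.lower line) then
        (p ++ [PySem.Str.strip (PySem.Str.replace (PySem.Str.replace line "-" "") "Protection:" "")], d, inSec, cr)
      else (p, d, inSec, cr)
    else if PySem.Str.isIn "Detach & Reset:" line || PySem.Str.isIn "detach" (PySem.Str.lower line) then
      if PySem.Str.isIn "detach" (PySem.Str.lower line) || PySem.Str.isIn "reset" (PySem.Str.lower line) then
        (p, d ++ [PySem.Str.strip (PySem.Str.replace (PySem.Str.replace line "-" "") "Detach & Reset:" "")], inSec, cr)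
      else (p, d, inSec, cr)
    else (p, d, inSec, cr)
  else (p, d, inSec, cr)

-- trailing default-notes block, identical text in A and in Source B
def pvDefaults (room_name : String) (p d : List String) : List String × List String :=
  if p.isEmpty && d.isEmpty then
    if PySem.Str.isIn "living" (PySem.Str.lower room_name) then
      (["cover furniture", "seal doorways"], ["wall-mounted TV", "artwork"])
    else if PySem.Str.isIn "kitchen" (PySem.Str.lower room_name) then
      (["plastic wrap appliances"], ["dishwasher", "refrigerator water line"])
    else if PySem.Str.isIn "bathroom" (PySem.Str.lower room_name) then
      (["cover fixtures"], ["toilet", "vanity"])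
    else (p, d)
  else (p, d)

def extract_additional_notes_from_intake_py (room_name : String) (intake_form : String) : List (String × List String) :=
  -- split('\n'): split? is some, the separator "\n" is non-empty
  let lines := (PySem.Str.split? intake_form "\n").getD []
  let st := lines.foldl (pvStepA room_name) ([], [], false, none)
  let pd := pvDefaults room_name st.1 st.2.1
  [("protection", pd.1), ("detach_reset", pd.2)]

-- ===== PORT B =====
-- inner while of Source B: collect stripped content lines until a 'Room:' line (not consumed)
-- or a bracket line (consumed); returns (body, remaining lines)
def pvSpanBody : List String → List String × List String
  | [] => ([], [])
  | t :: ts =>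
    if PySem.Str.startswith t "Room:" then ([], t :: ts)
    else if PySem.Str.startswith t "[" && PySem.Str.endswith t "]" then ([], ts)
    else (t :: (pvSpanBody ts).1, (pvSpanBody ts).2)

theorem pvSpanBody_rest_le (ls : List String) : (pvSpanBody ls).2.length ≤ ls.length := by
  induction ls with
  | nil => simp [pvSpanBody]
  | cons t ts ih =>
    simp only [pvSpanBody]
    split_ifs <;> simp
    omega

-- outer while of Source B: one (room, body) group per 'Room:' header line
def pvGroupRooms : List String → List (String × List String)
  | [] => []
  | s :: ss =>
    if PySem.Str.startswith s "Room:" then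
      (PySem.Str.strip (PySem.Str.replace s "Room:" ""), (pvSpanBody ss).1) :: pvGroupRooms (pvSpanBody ss).2
    else pvGroupRooms ss
termination_by ls => ls.length
decreasing_by
  · exact Nat.lt_succ_of_le (pvSpanBody_rest_le ss)
  · simp

-- one step of Source B's classification loop
def pvClassStep (st : List String × List String) (s : String) : List String × List String :=
  let (p, d) := st
  let low := PySem.Str.lower s
  if PySem.Str.isIn "Protection:" s || PySem.Str.isIn "protection" low then
    if PySem.Str.isIn "cover" low || PySem.Str.isIn "seal" low || PySem.Str.isIn "plastic" low then
      (p ++ [PySem.Str.strip (PySem.Str.replace (PySem.Str.replace s "-" "") "Protection:" "")], d)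
    else (p, d)
  else if PySem.Str.isIn "Detach & Reset:" s || PySem.Str.isIn "detach" low then
    if PySem.Str.isIn "detach" low || PySem.Str.isIn "reset" low then
      (p, d ++ [PySem.Str.strip (PySem.Str.replace (PySem.Str.replace s "-" "") "Detach & Reset:" "")])
    else (p, d)
  else (p, d)

def extract_additional_notes_from_intake_py_alt (room_name : String) (intake_form : String) : List (String × List String) :=
  let lines := ((PySem.Str.split? intake_form "\n").getD []).map PySem.Str.strip
  let groups := pvGroupRooms lines
  let gathered := (groups.filter (fun g => PySem.Str.lower g.1 == PySem.Str.lower room_name)).flatMap Prod.snd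
  let st := gathered.foldl pvClassStep ([], [])
  let pd := pvDefaults room_name st.1 st.2
  [("protection", pd.1), ("detach_reset", pd.2)]

-- ===== PRECONDITION & SPEC =====
def Spec_extract_additional_notes_from_intake_py (room_name : String) (intake_form : String) (out : List (String × List String)) : Prop := out = extract_additional_notes_from_intake_py_alt room_name intake_form
instance (room_name : String) (intake_form : String) (out : List (String × List String)) : Decidable (Spec_extract_additional_notes_from_intake_py room_name intake_form out) := by unfold Spec_extract_additional_notes_from_intake_py; infer_instance

-- ===== CLAIM (what is proved, stated in full; the proofs are below) =====
def Claim_equal_extract_additional_notes_from_intake_py : Prop := ∀ (room_name : String) (intake_form : String), Dom_extract_additional_notes_from_intake_py room_name intake_form → Spec_extract_additional_notes_from_intake_py room_name intake_form (extract_additional_notes_from_intake_py room_name intake_form)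

-- ===== LEMMAS AND PROOFS =====

-- the sequence of (stripped) lines A classifies, as a function of the in_room_section flag
def pvGather (room_name : String) : List String → Bool → List String
  | [], _ => []
  | s :: ss, inSec =>
    if PySem.Str.startswith s "Room:" then
      pvGather room_name ss
        (PySem.Str.lower (PySem.Str.strip (PySem.Str.replace s "Room:" "")) == PySem.Str.lower room_name)
    else if PySem.Str.startswith s "[" && PySem.Str.endswith s "]" then
      pvGather room_name ss false
    else if inSec then s :: pvGather room_name ss inSec
    else pvGather room_name ss inSec

theorem pvGather_span_false (room_name : String) (ls : List String) :
    pvGather room_name ls false = pvGather room_name (pvSpanBody ls).2 false := by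
  induction ls with
  | nil => rfl
  | cons t ts ih =>
    rcases h1 : PySem.Str.startswith t "Room:" with _ | _
    · rcases h2 : PySem.Str.startswith t "[" && PySem.Str.endswith t "]" with _ | _
      · simp only [pvGather, pvSpanBody, h1, h2, Bool.false_eq_true, reduceIte]
        exact ih
      · simp only [pvGather, pvSpanBody, h1, h2, Bool.false_eq_true, reduceIte]
    · simp only [pvGather, pvSpanBody, h1, reduceIte]

theorem pvGather_span_true (room_name : String) (ls : List String) :
    pvGather room_name ls true = (pvSpanBody ls).1 ++ pvGather room_name (pvSpanBody ls).2 false := by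
  induction ls with
  | nil => rfl
  | cons t ts ih =>
    rcases h1 : PySem.Str.startswith t "Room:" with _ | _
    · rcases h2 : PySem.Str.startswith t "[" && PySem.Str.endswith t "]" with _ | _
      · simp only [pvGather, pvSpanBody, h1, h2, Bool.false_eq_true, reduceIte, List.cons_append]
        rw [ih]
      · simp only [pvGather, pvSpanBody, h1, h2, Bool.false_eq_true, reduceIte, List.nil_append]
    · simp only [pvGather, pvSpanBody, h1, reduceIte, List.nil_append]

-- B's gathered list is exactly the sequence of lines A classifies (starting out of section)
theorem pvGroups_gather (room_name : String) (ls : List String) :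
    ((pvGroupRooms ls).filter (fun g => PySem.Str.lower g.1 == PySem.Str.lower room_name)).flatMap Prod.snd
      = pvGather room_name ls false := by
  induction ls using pvGroupRooms.induct with
  | case1 => rw [pvGroupRooms]; rfl
  | case2 s ss h ih =>
    rw [pvGroupRooms, if_pos h, pvGather, if_pos h]
    rcases hm : PySem.Str.lower (PySem.Str.strip (PySem.Str.replace s "Room:" "")) == PySem.Str.lower room_name
      with _ | _
    · rw [List.filter_cons]
      simp only [hm, Bool.false_eq_true, reduceIte]
      rw [ih]
      exact (pvGather_span_false room_name ss).symm
    · rw [List.filter_cons]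
      simp only [hm, reduceIte, List.flatMap_cons]
      rw [ih]
      exact (pvGather_span_true room_name ss).symm
  | case3 s ss h ih =>
    rw [pvGroupRooms, if_neg h, pvGather, if_neg h]
    rcases h2 : PySem.Str.startswith s "[" && PySem.Str.endswith s "]" with _ | _
    · simp only [Bool.false_eq_true, reduceIte]
      exact ih
    · simp only [reduceIte]
      exact ih

-- the content-line case of A's step performs B's classification step
theorem pvStepA_content (room_name : String) (p d : List String) (cr : Option String) (s : String)
    (h1 : PySem.Str.startswith (PySem.Str.strip s) "Room:" = false)
    (h2 : (PySem.Str.startswith (PySem.Str.strip s) "[" && PySem.Str.endswith (PySem.Str.strip s) "]") = false) :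
    pvStepA room_name (p, d, true, cr) s
      = ((pvClassStep (p, d) (PySem.Str.strip s)).1, (pvClassStep (p, d) (PySem.Str.strip s)).2, true, cr) := by
  simp only [pvStepA, pvClassStep, h1, h2, Bool.false_or, Bool.false_eq_true, reduceIte]
  split_ifs <;> rfl

-- A's fold from any state computes B's classification of the gathered lines
theorem pvFoldA_eq (room_name : String) (ls : List String) (p d : List String) (inSec : Bool)
    (cr : Option String) :
    ((ls.foldl (pvStepA room_name) (p, d, inSec, cr)).1,
     (ls.foldl (pvStepA room_name) (p, d, inSec, cr)).2.1)
      = (pvGather room_name (ls.map PySem.Str.strip) inSec).foldl pvClassStep (p, d) := by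
  induction ls generalizing p d inSec cr with
  | nil => rfl
  | cons s ss ih =>
    simp only [List.foldl_cons, List.map_cons]
    rw [pvGather]
    rcases h1 : PySem.Str.startswith (PySem.Str.strip s) "Room:" with _ | _
    · rcases h2 : PySem.Str.startswith (PySem.Str.strip s) "[" && PySem.Str.endswith (PySem.Str.strip s) "]"
        with _ | _
      · rcases hsec : inSec with _ | _
        · have hst : pvStepA room_name (p, d, false, cr) s = (p, d, false, cr) := by
            simp only [pvStepA, h1, h2, Bool.false_or, Bool.false_eq_true, reduceIte]
          simp only [Bool.false_eq_true, reduceIte, hst]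
          exact ih p d false cr
        · simp only [Bool.false_eq_true, reduceIte, List.foldl_cons]
          rw [pvStepA_content room_name p d cr s h1 h2, ih]
      · have hst : pvStepA room_name (p, d, inSec, cr) s = (p, d, false, cr) := by
          simp only [pvStepA, h1, h2, Bool.false_or, Bool.false_eq_true, reduceIte]
        simp only [Bool.false_eq_true, reduceIte, hst]
        exact ih p d false cr
    · have hst : pvStepA room_name (p, d, inSec, cr) s
          = (p, d,
             PySem.Str.lower (PySem.Str.strip (PySem.Str.replace (PySem.Str.strip s) "Room:" "")) ==
               PySem.Str.lower room_name,
             some (PySem.Str.strip (PySem.Str.replace (PySem.Str.strip s) "Room:" ""))) := by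
        simp only [pvStepA, h1, reduceIte]
      simp only [reduceIte, hst]
      exact ih p d _ _

-- ===== VERDICT (by name: the statement is the Claim_ definition above) =====
theorem extract_additional_notes_from_intake_py_spec : Claim_equal_extract_additional_notes_from_intake_py := by
  intro room_name intake_form _
  show _ = _
  simp only [extract_additional_notes_from_intake_py, extract_additional_notes_from_intake_py_alt]
  rw [pvGroups_gather room_name, ← pvFoldA_eq room_name _ [] [] false none]
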